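-- pv_equiv track=rewrite | github.com/philippsommer27/calabash | src/analysis/process_ptrace.py | find_all_descendants
-- ===== SOURCE A (Python) =====
-- def find_all_descendants(process_tree, pid):
--     descendants = []
--     stack = [pid]
--
--     while stack:
--         current_pid = stack.pop()
--         descendants.append(current_pid)
--
--         if current_pid in process_tree:
--             stack.extend(process_tree[current_pid])
--
--     return descendants
-- ===== SOURCE B (Python) =====
-- def find_all_descendants(process_tree, pid):
--     # Expand the output list in place: at index i, splice the children of
--     # order[i] (reversed, to match LIFO order) right after it, then advance.
--     order = [pid]
--     i = 0
--     while i < len(order):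
--         order[i + 1:i + 1] = reversed(process_tree.get(order[i], []))
--         i += 1
--     return order
-- ===== Notes on version B (the rewrite author's own statement) =====
-- stated objective: alternative
-- what changed: B replaces A's separate explicit stack with in-place expansion of the output list itself: at index i it splices the (reversed) children of order[i] right after position i and advances, so the result list doubles as the work queue.
import Mathlib
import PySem

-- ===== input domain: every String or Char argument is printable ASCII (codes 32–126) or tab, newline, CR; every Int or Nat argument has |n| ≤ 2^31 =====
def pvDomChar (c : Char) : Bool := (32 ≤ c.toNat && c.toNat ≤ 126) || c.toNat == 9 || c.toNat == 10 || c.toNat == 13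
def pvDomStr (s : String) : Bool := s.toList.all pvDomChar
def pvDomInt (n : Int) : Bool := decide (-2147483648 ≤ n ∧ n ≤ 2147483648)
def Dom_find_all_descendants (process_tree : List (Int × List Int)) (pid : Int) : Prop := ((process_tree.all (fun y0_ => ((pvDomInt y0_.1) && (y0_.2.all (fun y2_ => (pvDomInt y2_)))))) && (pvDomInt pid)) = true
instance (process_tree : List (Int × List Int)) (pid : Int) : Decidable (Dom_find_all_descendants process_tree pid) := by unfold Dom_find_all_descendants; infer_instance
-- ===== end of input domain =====

-- B expands the output list in place (splicing children after the current index) instead of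
-- keeping a separate explicit stack; objective: alternative decomposition, same cost.


-- ===== PORT A =====
-- dict lookup (first match = the dict's binding for p); `p in process_tree` succeeds iff this is `some`
def pvLookup (t : List (Int × List Int)) (p : Int) : Option (List Int) :=
  (t.find? (fun kv => kv.1 == p)).map (fun kv => kv.2)

-- fuel: an upper bound on the number of loop iterations (pops) A performs on any input
-- satisfying Pre_; purely a totality device, the Python loop has no counterpart.
def pvFuel (t : List (Int × List Int)) : Nat :=
  ((t.map (fun kv => kv.2.length)).sum + 2) ^ (t.length + 2)

-- A's while-loop; the stack is kept top-first (Python's stack.pop takes the END, so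
-- stack.extend(cs) puts cs.reverse at the front of our list).
def faLoop (t : List (Int × List Int)) : Nat → List Int → List Int → List Int
  | 0, _, descendants => descendants
  | _ + 1, [], descendants => descendants
  | f + 1, p :: stack, descendants =>
    match pvLookup t p with
    | some cs => faLoop t f (cs.reverse ++ stack) (descendants ++ [p])
    | none => faLoop t f stack (descendants ++ [p])

def find_all_descendants (process_tree : List (Int × List Int)) (pid : Int) : List Int :=
  faLoop process_tree (pvFuel process_tree) [pid] []

-- ===== PORT B =====
-- Source B's while-loop: order[i+1:i+1] = reversed(children); i += 1 (same fuel device).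
def fbLoop (t : List (Int × List Int)) : Nat → Nat → List Int → List Int
  | 0, _, order => order
  | f + 1, i, order =>
    if i < order.length then
      let children := (pvLookup t (order.getD i 0)).getD []
      fbLoop t f (i + 1) (order.take (i + 1) ++ children.reverse ++ order.drop (i + 1))
    else order

def find_all_descendants_alt (process_tree : List (Int × List Int)) (pid : Int) : List Int :=
  fbLoop process_tree (pvFuel process_tree) 0 [pid]

-- ===== PRECONDITION & SPEC =====
-- children of p (empty when p is not a key)
def pvChildren (t : List (Int × List Int)) (p : Int) : List Int := (pvLookup t p).getD []

-- the set of keys of the dict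
def pvKeys (t : List (Int × List Int)) : Finset Int := (t.map Prod.fst).toFinset

-- one closure step: add every key that is a child of some already-reached node
def pvGrow (t : List (Int × List Int)) (s : Finset Int) : Finset Int :=
  s ∪ (pvKeys t).filter (fun k => ∃ p ∈ s, k ∈ pvChildren t p)

-- keys that are direct children of p
def pvSeed (t : List (Int × List Int)) (p : Int) : Finset Int :=
  (pvKeys t).filter (fun k => k ∈ pvChildren t p)

-- keys reachable from p in at least one step (the closure is a fixpoint after ≤ |t| steps)
def pvReachF (t : List (Int × List Int)) (p : Int) : Finset Int :=
  (pvGrow t)^[t.length + 1] (pvSeed t p)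

-- nodes reachable from pid (pid itself included)
def pvReach (t : List (Int × List Int)) (pid : Int) : Finset Int :=
  insert pid (pvReachF t pid)

-- Pre_ excludes exactly the inputs on which A never returns: those with a key-to-key cycle
-- reachable from pid (A's stack loop then runs forever); on every input where A returns, Pre_ holds.
def Pre_find_all_descendants (process_tree : List (Int × List Int)) (pid : Int) : Prop :=
  ∀ k ∈ pvKeys process_tree, k ∈ pvReach process_tree pid → k ∉ pvReachF process_tree k
instance (process_tree : List (Int × List Int)) (pid : Int) : Decidable (Pre_find_all_descendants process_tree pid) := by unfold Pre_find_all_descendants; infer_instance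
def pvWitness_find_all_descendants : (List (Int × List Int)) × Int := ([(1, [2, 3]), (3, [4])], 1)

def Spec_find_all_descendants (process_tree : List (Int × List Int)) (pid : Int) (out : List Int) : Prop := out = find_all_descendants_alt process_tree pid
instance (process_tree : List (Int × List Int)) (pid : Int) (out : List Int) : Decidable (Spec_find_all_descendants process_tree pid out) := by unfold Spec_find_all_descendants; infer_instance

-- ===== CLAIM (what is proved, stated in full; the proofs are below) =====
def Claim_equal_find_all_descendants : Prop := ∀ (process_tree : List (Int × List Int)) (pid : Int), Dom_find_all_descendants process_tree pid → Pre_find_all_descendants process_tree pid → Spec_find_all_descendants process_tree pid (find_all_descendants process_tree pid)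

-- ===== LEMMAS AND PROOFS =====

theorem pvKeys_iff (t : List (Int × List Int)) (p : Int) :
    p ∈ pvKeys t ↔ ∃ kv ∈ t, kv.1 = p := by
  simp [pvKeys]

theorem pvLookup_mem {t : List (Int × List Int)} {p : Int} {cs : List Int}
    (h : pvLookup t p = some cs) : ∃ kv ∈ t, kv.1 = p ∧ kv.2 = cs := by
  unfold pvLookup at h
  cases hf : t.find? (fun kv => kv.1 == p) with
  | none => simp [hf] at h
  | some kv =>
    refine ⟨kv, List.mem_of_find?_eq_some hf, by simpa using List.find?_some hf, ?_⟩
    simp [hf] at h; exact h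

theorem pvChildren_nonkey {t : List (Int × List Int)} {p : Int} (h : p ∉ pvKeys t) :
    pvChildren t p = [] := by
  unfold pvChildren
  cases hf : pvLookup t p with
  | none => rfl
  | some cs =>
    obtain ⟨kv, hmem, hkey, _⟩ := pvLookup_mem hf
    exact absurd ((pvKeys_iff t p).mpr ⟨kv, hmem, hkey⟩) h

theorem mem_pvSeed {t : List (Int × List Int)} {p c : Int} :
    c ∈ pvSeed t p ↔ c ∈ pvKeys t ∧ c ∈ pvChildren t p := by
  simp [pvSeed]

theorem pvSeed_subset_keys (t : List (Int × List Int)) (p : Int) :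
    pvSeed t p ⊆ pvKeys t := Finset.filter_subset _ _

theorem subset_pvGrow (t : List (Int × List Int)) (s : Finset Int) :
    s ⊆ pvGrow t s := Finset.subset_union_left

theorem pvGrow_mono {t : List (Int × List Int)} {s s' : Finset Int} (h : s ⊆ s') :
    pvGrow t s ⊆ pvGrow t s' := by
  intro k hk
  simp only [pvGrow, Finset.mem_union, Finset.mem_filter] at hk ⊢
  rcases hk with hk | ⟨hkk, p, hp, hc⟩
  · exact Or.inl (h hk)
  · exact Or.inr ⟨hkk, p, h hp, hc⟩

theorem subset_iterate_pvGrow (t : List (Int × List Int)) (s : Finset Int) (n : Nat) :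
    s ⊆ (pvGrow t)^[n] s := by
  induction n generalizing s with
  | zero => simp
  | succ n ih =>
    rw [Function.iterate_succ_apply]
    exact (subset_pvGrow t s).trans (ih (pvGrow t s))

theorem iterate_pvGrow_subset_keys {t : List (Int × List Int)} {s : Finset Int}
    (hs : s ⊆ pvKeys t) (n : Nat) : (pvGrow t)^[n] s ⊆ pvKeys t := by
  induction n generalizing s with
  | zero => simpa
  | succ n ih =>
    rw [Function.iterate_succ_apply]
    exact ih (Finset.union_subset hs (Finset.filter_subset _ _))

theorem pvGrow_growth {t : List (Int × List Int)} {s : Finset Int} :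
    ∀ i : Nat, (∀ j < i, (pvGrow t)^[j + 1] s ≠ (pvGrow t)^[j] s) →
      i ≤ ((pvGrow t)^[i] s).card := by
  intro i
  induction i with
  | zero => intro _; omega
  | succ i ih =>
    intro h
    have h1 : i ≤ ((pvGrow t)^[i] s).card := ih (fun j hj => h j (by omega))
    have hsub : (pvGrow t)^[i] s ⊆ (pvGrow t)^[i + 1] s := by
      rw [Function.iterate_succ_apply']
      exact subset_pvGrow t _
    have hne : (pvGrow t)^[i + 1] s ≠ (pvGrow t)^[i] s := h i (by omega)
    have : ((pvGrow t)^[i] s).card < ((pvGrow t)^[i + 1] s).card :=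
      Finset.card_lt_card (hsub.ssubset_of_ne (Ne.symm hne))
    omega

theorem pvGrow_stabilize {t : List (Int × List Int)} {s : Finset Int} {j : Nat}
    (h : (pvGrow t)^[j + 1] s = (pvGrow t)^[j] s) :
    ∀ m, j ≤ m → (pvGrow t)^[m] s = (pvGrow t)^[j] s := by
  intro m hm
  induction m with
  | zero =>
    have hj0 : j = 0 := by omega
    rw [hj0]
  | succ m ih =>
    by_cases hjm : j ≤ m
    · rw [Function.iterate_succ_apply' (pvGrow t) m s, ih hjm,
        ← Function.iterate_succ_apply' (pvGrow t) j s]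
      exact h
    · have : j = m + 1 := by omega
      rw [this]

theorem pvKeys_card_le (t : List (Int × List Int)) : (pvKeys t).card ≤ t.length := by
  calc (pvKeys t).card ≤ (t.map Prod.fst).length := List.toFinset_card_le _
    _ = t.length := by simp

theorem pvReachF_fixed (t : List (Int × List Int)) (p : Int) :
    pvGrow t (pvReachF t p) = pvReachF t p := by
  unfold pvReachF
  set n := t.length + 1 with hn
  by_cases h : ∃ j < n, (pvGrow t)^[j + 1] (pvSeed t p) = (pvGrow t)^[j] (pvSeed t p)
  · obtain ⟨j, hj, hfix⟩ := h
    have hnn : (pvGrow t)^[n] (pvSeed t p) = (pvGrow t)^[j] (pvSeed t p) :=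
      pvGrow_stabilize hfix n (by omega)
    rw [hnn, ← Function.iterate_succ_apply' (pvGrow t) j (pvSeed t p)]
    exact hfix
  · exfalso
    have h' : ∀ j < n, (pvGrow t)^[j + 1] (pvSeed t p) ≠ (pvGrow t)^[j] (pvSeed t p) :=
      fun j hj hne => h ⟨j, hj, hne⟩
    have hg := pvGrow_growth (t := t) (s := pvSeed t p) n h'

    have hsub : (pvGrow t)^[n] (pvSeed t p) ⊆ pvKeys t :=
      iterate_pvGrow_subset_keys (pvSeed_subset_keys t p) n
    have := (Finset.card_le_card hsub).trans (pvKeys_card_le t)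
    omega

theorem pvGrow_least {t : List (Int × List Int)} {C s : Finset Int}
    (hC : pvGrow t C ⊆ C) (hs : s ⊆ C) (n : Nat) : (pvGrow t)^[n] s ⊆ C := by
  induction n generalizing s with
  | zero => simpa
  | succ n ih =>
    rw [Function.iterate_succ_apply]
    exact ih ((pvGrow_mono hs).trans hC)

theorem pvReachF_trans {t : List (Int × List Int)} {p q : Int}
    (hq : q ∈ pvReachF t p) : pvReachF t q ⊆ pvReachF t p := by
  apply pvGrow_least (le_of_eq (pvReachF_fixed t p))
  intro k hk
  obtain ⟨hkk, hkc⟩ := mem_pvSeed.mp hk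
  have : k ∈ pvGrow t (pvReachF t p) := by
    simp only [pvGrow, Finset.mem_union, Finset.mem_filter]
    exact Or.inr ⟨hkk, q, hq, hkc⟩
  rwa [pvReachF_fixed t p] at this

theorem child_in_pvReachF {t : List (Int × List Int)} {p c : Int}
    (hc : c ∈ pvChildren t p) (hk : c ∈ pvKeys t) : c ∈ pvReachF t p :=
  subset_iterate_pvGrow t (pvSeed t p) (t.length + 1) (mem_pvSeed.mpr ⟨hk, hc⟩)

-- a stack element is either reachable from pid or not a key at all
def pvGood (t : List (Int × List Int)) (pid p : Int) : Prop :=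
  p ∈ pvReach t pid ∨ p ∉ pvKeys t

theorem pvGood_pid (t : List (Int × List Int)) (pid : Int) : pvGood t pid pid :=
  Or.inl (Finset.mem_insert_self _ _)

theorem child_good {t : List (Int × List Int)} {pid p c : Int}
    (hg : pvGood t pid p) (hc : c ∈ pvChildren t p) : pvGood t pid c := by
  by_cases hck : c ∈ pvKeys t
  · left
    have hp : p ∈ pvReach t pid := by
      rcases hg with h | h
      · exact h
      · rw [pvChildren_nonkey h] at hc; simp at hc
    rcases Finset.mem_insert.mp hp with h | h
    · subst h
      exact Finset.mem_insert_of_mem (child_in_pvReachF hc hck)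
    · exact Finset.mem_insert_of_mem (pvReachF_trans h (child_in_pvReachF hc hck))
  · exact Or.inr hck

theorem child_rank {t : List (Int × List Int)} {pid p c : Int}
    (hpre : Pre_find_all_descendants t pid)
    (hg : pvGood t pid p) (hc : c ∈ pvChildren t p) (hck : c ∈ pvKeys t) :
    (pvReachF t c).card < (pvReachF t p).card := by
  have hcp : c ∈ pvReachF t p := child_in_pvReachF hc hck
  have hcreach : c ∈ pvReach t pid := by
    rcases child_good hg hc with h | h
    · exact h
    · exact absurd hck h
  have hnot : c ∉ pvReachF t c := hpre c hck hcreach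
  have hsub : pvReachF t c ⊆ pvReachF t p := pvReachF_trans hcp
  exact Finset.card_lt_card ((Finset.ssubset_iff_of_subset hsub).mpr ⟨c, hcp, hnot⟩)

theorem pvRank_le (t : List (Int × List Int)) (p : Int) :
    (pvReachF t p).card ≤ t.length :=
  (Finset.card_le_card (iterate_pvGrow_subset_keys (pvSeed_subset_keys t p) _)).trans
    (pvKeys_card_le t)

-- depth-fuelled DFS denotation both loops are proved equal to
def pvDfs (t : List (Int × List Int)) : Nat → Int → List Int
  | 0, p => [p]
  | f + 1, p => p :: ((pvChildren t p).reverse).flatMap (pvDfs t f)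

theorem pvDfs_nonkey {t : List (Int × List Int)} {p : Int} (h : p ∉ pvKeys t) :
    ∀ f, pvDfs t f p = [p] := by
  intro f
  cases f with
  | zero => rfl
  | succ f => simp [pvDfs, pvChildren_nonkey h]

-- fuel irrelevance: any fuel above the rank computes the same DFS
theorem pvDfs_irrel {t : List (Int × List Int)} {pid : Int}
    (hpre : Pre_find_all_descendants t pid) :
    ∀ f g p, pvGood t pid p → (pvReachF t p).card < f → (pvReachF t p).card < g →
      pvDfs t f p = pvDfs t g p := by
  intro f
  induction f with
  | zero => intro g p _ hf; omega
  | succ f ih =>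
    intro g p hg hf hgg
    cases g with
    | zero => omega
    | succ g =>
      simp only [pvDfs, List.cons.injEq, true_and, List.flatMap_def]
      apply congrArg
      apply List.map_congr_left
      intro c hc
      have hc' : c ∈ pvChildren t p := List.mem_reverse.mp hc
      by_cases hck : c ∈ pvKeys t
      · have hr := child_rank hpre hg hc' hck
        exact ih g c (child_good hg hc') (by omega) (by omega)
      · rw [pvDfs_nonkey hck, pvDfs_nonkey hck]

-- canonical depth
def pvL (t : List (Int × List Int)) : Nat := t.length + 1

-- one-step unfolding of the canonical DFS
theorem pvDfs_expand {t : List (Int × List Int)} {pid : Int}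
    (hpre : Pre_find_all_descendants t pid) {p : Int} (hg : pvGood t pid p) :
    pvDfs t (pvL t) p = p :: ((pvChildren t p).reverse).flatMap (pvDfs t (pvL t)) := by
  show pvDfs t (t.length + 1) p = _
  simp only [pvDfs, List.cons.injEq, true_and, List.flatMap_def]
  apply congrArg
  apply List.map_congr_left
  intro c hc
  have hc' : c ∈ pvChildren t p := List.mem_reverse.mp hc
  by_cases hck : c ∈ pvKeys t
  · have hr := child_rank hpre hg hc' hck
    have hle := pvRank_le t p
    exact pvDfs_irrel hpre t.length (pvL t) c (child_good hg hc') (by omega)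
      (by unfold pvL; omega)
  · rw [pvDfs_nonkey hck, pvDfs_nonkey hck]

theorem pvDfs_len_pos (t : List (Int × List Int)) (f : Nat) (p : Int) :
    1 ≤ (pvDfs t f p).length := by
  cases f <;> simp [pvDfs]

def pvM (t : List (Int × List Int)) : Nat := (t.map (fun kv => kv.2.length)).sum

theorem pvChildren_len_le (t : List (Int × List Int)) (p : Int) :
    (pvChildren t p).length ≤ pvM t := by
  cases hlk : pvLookup t p with
  | none => simp [pvChildren, hlk]
  | some cs =>
    obtain ⟨kv, hmem, _, hcs⟩ := pvLookup_mem hlk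
    have : kv.2.length ≤ pvM t := by
      unfold pvM
      exact List.le_sum_of_mem (List.mem_map_of_mem hmem)
    simpa [pvChildren, hlk, ← hcs] using this

-- size bound on the DFS output
theorem pvDfs_len_le (t : List (Int × List Int)) :
    ∀ f p, (pvDfs t f p).length ≤ (pvM t + 1) ^ f := by
  intro f
  induction f with
  | zero => intro p; simp [pvDfs]
  | succ f ih =>
    intro p
    have hsum : ∀ l : List Int, (l.flatMap (pvDfs t f)).length ≤ l.length * (pvM t + 1) ^ f := by
      intro l
      induction l with
      | nil => simp
      | cons x xs ihl =>
        simp only [List.flatMap_cons, List.length_append, List.length_cons]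
        have := ih x
        calc (pvDfs t f x).length + (xs.flatMap (pvDfs t f)).length
            ≤ (pvM t + 1) ^ f + xs.length * (pvM t + 1) ^ f := Nat.add_le_add this ihl
          _ = (xs.length + 1) * (pvM t + 1) ^ f := by ring
    simp only [pvDfs, List.length_cons]
    have h1 := hsum (pvChildren t p).reverse
    have h2 : (pvChildren t p).reverse.length ≤ pvM t := by
      simpa using pvChildren_len_le t p
    have h3 : 1 ≤ (pvM t + 1) ^ f := Nat.one_le_pow _ _ (by omega)
    calc (((pvChildren t p).reverse).flatMap (pvDfs t f)).length + 1
        ≤ pvM t * (pvM t + 1) ^ f + 1 :=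
          Nat.add_le_add_right (le_trans h1 (Nat.mul_le_mul_right _ h2)) 1
      _ ≤ (pvM t + 1) ^ (f + 1) := by
          rw [pow_succ]
          calc pvM t * (pvM t + 1) ^ f + 1 ≤ pvM t * (pvM t + 1) ^ f + (pvM t + 1) ^ f :=
                Nat.add_le_add_left h3 _
            _ = (pvM t + 1) ^ f * (pvM t + 1) := by ring

def pvCost (t : List (Int × List Int)) (l : List Int) : Nat :=
  (l.map (fun p => (pvDfs t (pvL t) p).length)).sum

theorem pvCost_append (t : List (Int × List Int)) (l l' : List Int) :
    pvCost t (l ++ l') = pvCost t l + pvCost t l' := by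
  simp [pvCost]

theorem pvCost_cons (t : List (Int × List Int)) (p : Int) (l : List Int) :
    pvCost t (p :: l) = (pvDfs t (pvL t) p).length + pvCost t l := by
  simp [pvCost]

-- A's loop computes the DFS denotation, given enough fuel
theorem faLoop_eq {t : List (Int × List Int)} {pid : Int}
    (hpre : Pre_find_all_descendants t pid) :
    ∀ f st desc, (∀ x ∈ st, pvGood t pid x) → pvCost t st ≤ f →
      faLoop t f st desc = desc ++ st.flatMap (pvDfs t (pvL t)) := by
  intro f
  induction f with
  | zero =>
    intro st desc _ h
    cases st with
    | nil => simp [faLoop]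
    | cons p rest =>
      exfalso
      have := pvDfs_len_pos t (pvL t) p
      rw [pvCost_cons] at h
      omega
  | succ f ih =>
    intro st desc hgood h
    cases st with
    | nil => simp [faLoop]
    | cons p rest =>
      have hgp : pvGood t pid p := hgood p List.mem_cons_self
      have hstep : faLoop t (f + 1) (p :: rest) desc
          = faLoop t f ((pvChildren t p).reverse ++ rest) (desc ++ [p]) := by
        cases hlk : pvLookup t p with
        | some cs => simp [faLoop, hlk, pvChildren]
        | none => simp [faLoop, hlk, pvChildren]
      have hexp := pvDfs_expand hpre hgp
      have hgood' : ∀ x ∈ (pvChildren t p).reverse ++ rest, pvGood t pid x := by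
        intro x hx
        rcases List.mem_append.mp hx with hx | hx
        · exact child_good hgp (List.mem_reverse.mp hx)
        · exact hgood x (List.mem_cons_of_mem _ hx)
      have hcost : pvCost t ((pvChildren t p).reverse ++ rest) ≤ f := by
        have h1 : pvCost t (p :: rest) = (pvDfs t (pvL t) p).length + pvCost t rest := by
          simp [pvCost]
        have h2 : (pvDfs t (pvL t) p).length
            = 1 + pvCost t ((pvChildren t p).reverse) := by
          rw [hexp]
          simp only [List.length_cons, pvCost]
          rw [List.length_flatMap]
          omega
        rw [pvCost_append]
        have h3 := h
        rw [h1] at h3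
        omega
      rw [hstep, ih _ _ hgood' hcost]
      simp only [List.flatMap_cons, List.flatMap_append, List.append_assoc]
      rw [hexp]
      simp

-- B's loop computes the same denotation: positions < i are final, the tail is unexpanded roots
theorem fbLoop_eq {t : List (Int × List Int)} {pid : Int}
    (hpre : Pre_find_all_descendants t pid) :
    ∀ f i order, (∀ x ∈ order, pvGood t pid x) → pvCost t (order.drop i) ≤ f →
      fbLoop t f i order = order.take i ++ (order.drop i).flatMap (pvDfs t (pvL t)) := by
  intro f
  induction f with
  | zero =>
    intro i order _ h
    have hdrop : order.drop i = [] := by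
      cases hd : order.drop i with
      | nil => rfl
      | cons p rest =>
        exfalso
        have := pvDfs_len_pos t (pvL t) p
        rw [hd, pvCost_cons] at h
        omega
    have hlen : order.length ≤ i := by
      have := List.drop_eq_nil_iff.mp hdrop
      omega
    simp [fbLoop, hdrop, List.take_of_length_le hlen]
  | succ f ih =>
    intro i order hgood h
    by_cases hi : i < order.length
    · have hget : order.getD i 0 = order[i] := List.getD_eq_getElem order 0 hi
      have hdrop : order.drop i = order[i] :: order.drop (i + 1) :=
        (List.drop_eq_getElem_cons hi)
      set p := order[i] with hp
      have hgp : pvGood t pid p := hgood p (List.getElem_mem hi)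
      set order' := order.take (i + 1) ++ (pvChildren t p).reverse ++ order.drop (i + 1) with horder'
      have hstep : fbLoop t (f + 1) i order = fbLoop t f (i + 1) order' := by
        simp only [fbLoop, hi, if_pos, hget]
        rfl
      have htake_len : (order.take (i + 1)).length = i + 1 := by
        simp
        omega
      have hdrop' : order'.drop (i + 1) = (pvChildren t p).reverse ++ order.drop (i + 1) := by
        rw [horder', List.append_assoc, List.drop_append_of_le_length (by omega)]
        simp [List.length_take]
      have htake' : order'.take (i + 1) = order.take (i + 1) := by
        rw [horder', List.append_assoc, List.take_append_of_le_length (by omega)]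
        simp [htake_len]
      have hexp := pvDfs_expand hpre hgp
      have hgood' : ∀ x ∈ order', pvGood t pid x := by
        intro x hx
        rw [horder'] at hx
        rcases List.mem_append.mp hx with hx | hx
        · rcases List.mem_append.mp hx with hx | hx
          · exact hgood x (List.mem_of_mem_take hx)
          · exact child_good hgp (List.mem_reverse.mp hx)
        · exact hgood x (List.mem_of_mem_drop hx)
      have hcost : pvCost t (order'.drop (i + 1)) ≤ f := by
        rw [hdrop', pvCost_append]
        have h1 : pvCost t (order.drop i)
            = (pvDfs t (pvL t) p).length + pvCost t (order.drop (i + 1)) := by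
          rw [hdrop]; simp [pvCost]
        have h2 : (pvDfs t (pvL t) p).length
            = 1 + pvCost t ((pvChildren t p).reverse) := by
          rw [hexp]
          simp only [List.length_cons, pvCost]
          rw [List.length_flatMap]
          omega
        omega
      rw [hstep, ih _ _ hgood' hcost, htake', hdrop']
      have htakes : order.take (i + 1) = order.take i ++ [p] :=
        List.take_succ_eq_append_getElem hi
      rw [htakes, hdrop]
      simp only [List.flatMap_cons, List.flatMap_append, List.append_assoc]
      rw [hexp]
      simp
    · have hdrop : order.drop i = [] := List.drop_eq_nil_iff.mpr (by omega)
      have : fbLoop t (f + 1) i order = order := by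
        simp [fbLoop, hi]
      rw [this, hdrop, List.take_of_length_le (by omega)]
      simp

-- the fuel bound covers the cost of the initial one-element stack
theorem pvFuel_ok (t : List (Int × List Int)) (p : Int) :
    pvCost t [p] ≤ pvFuel t := by
  have h1 : pvCost t [p] = (pvDfs t (pvL t) p).length := by simp [pvCost]
  have h2 := pvDfs_len_le t (pvL t) p
  have h3 : (pvM t + 1) ^ (pvL t) ≤ (pvM t + 2) ^ (t.length + 2) := by
    calc (pvM t + 1) ^ (pvL t) ≤ (pvM t + 2) ^ (pvL t) :=
          Nat.pow_le_pow_left (by omega) _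
      _ ≤ (pvM t + 2) ^ (t.length + 2) :=
          Nat.pow_le_pow_right (by omega) (by unfold pvL; omega)
  calc pvCost t [p] ≤ (pvM t + 1) ^ (pvL t) := by rw [h1]; exact h2
    _ ≤ (pvM t + 2) ^ (t.length + 2) := h3
    _ = pvFuel t := by simp [pvFuel, pvM]

-- ===== VERDICT (by name: the statement is the Claim_ definition above) =====
theorem find_all_descendants_spec : Claim_equal_find_all_descendants := by
  intro t pid _ hpre
  show find_all_descendants t pid = find_all_descendants_alt t pid
  unfold find_all_descendants find_all_descendants_alt
  have hgood : ∀ x ∈ [pid], pvGood t pid x := by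
    simp only [List.mem_singleton]
    rintro x rfl
    exact pvGood_pid t x
  rw [faLoop_eq hpre _ _ _ hgood (pvFuel_ok t pid),
      fbLoop_eq hpre _ _ _ hgood (by simpa using pvFuel_ok t pid)]
  simp
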